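-- pv_equiv track=rewrite | github.com/ulsmallzhou/Dice | dice-v1.0.py | bracket_match
-- ===== SOURCE A (Python) =====
-- def bracket_match(ipt: str) -> list[bool, list[int]]:
--     '''返回字符串小括号是否成功匹配以及匹配时返回全部左右小括号位置'''
--     if not isinstance(ipt, str): return [False, [], [], [], []] # 确保是字符串
--     bracket_L, bracket_R, char_id, bracket_steak, main_bracket_L, main_bracket_R = [], [], 0, [], [], []
--     for char in ipt:
--         if char == '(':
--             if len(bracket_steak) == 0: main_bracket_L.append(char_id)
--             bracket_steak.append(char_id)
--         elif char == ')':
--             if len(bracket_steak) == 0: return [False, [], [], [], []]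
--             bracket_L.append(bracket_steak[-1])
--             bracket_R.append(char_id)
--             bracket_steak.pop()
--             if len(bracket_steak) == 0: main_bracket_R.append(char_id)
--         char_id += 1
--     return [len(bracket_steak) == 0, bracket_L, bracket_R, main_bracket_L, main_bracket_R]
-- ===== SOURCE B (Python) =====
-- def bracket_match(ipt: str) -> list[bool, list[int]]:
--     '''Recursive-descent over the nesting structure instead of an explicit position stack.'''
--     if not isinstance(ipt, str): return [False, [], [], [], []]
--     s, n = ipt, len(ipt)
--
--     def group(i, open_pos, L, R):
--         # parse the inside of a group opened at open_pos, starting at i;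
--         # returns (index past the closing ')', L, R), or (None, L, R) if the group is never closed
--         while i < n:
--             c = s[i]
--             if c == '(':
--                 j, L, R = group(i + 1, i, L, R)
--                 if j is None:
--                     return None, L, R
--                 i = j
--             elif c == ')':
--                 return i + 1, L + [open_pos], R + [i]
--             else:
--                 i += 1
--         return None, L, R
--
--     L, R, mL, mR = [], [], [], []
--     i = 0
--     while i < n:
--         c = s[i]
--         if c == '(':
--             mL = mL + [i]
--             j, L, R = group(i + 1, i, L, R)
--             if j is None:
--                 return [False, L, R, mL, mR]
--             mR = mR + [j - 1]
--             i = j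
--         elif c == ')':
--             return [False, [], [], [], []]
--         else:
--             i += 1
--     return [True, L, R, mL, mR]
-- ===== Notes on version B (the rewrite author's own statement) =====
-- stated objective: alternative
-- what changed: The explicit open-position stack is replaced by a recursive-descent parser over the nesting structure: a helper parses one parenthesised group and returns the index just past the position that closes it, so pairing comes from the call structure instead of a stack.
import Mathlib
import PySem

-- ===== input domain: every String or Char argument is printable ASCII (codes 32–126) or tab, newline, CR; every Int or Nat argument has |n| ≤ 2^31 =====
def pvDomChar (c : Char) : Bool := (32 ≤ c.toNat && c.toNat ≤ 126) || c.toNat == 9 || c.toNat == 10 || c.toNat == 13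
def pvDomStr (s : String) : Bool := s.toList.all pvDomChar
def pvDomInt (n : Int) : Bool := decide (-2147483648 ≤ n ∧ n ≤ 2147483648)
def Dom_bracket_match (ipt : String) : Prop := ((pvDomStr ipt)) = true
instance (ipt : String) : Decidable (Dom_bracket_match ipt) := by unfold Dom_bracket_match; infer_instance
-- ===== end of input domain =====

-- B replaces A's explicit position stack by a recursive-descent parser over the nesting
-- structure (same return value, same O(n) cost; equivalence of RETURN values is proved).

-- ===== PORT A =====
-- A's for-loop over characters: structural recursion over the char list; the Python list
-- 'bracket_steak' used as a stack is kept top-at-head (append/[-1]/pop act on the head).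
-- The isinstance guard is always true for a String argument and is omitted.
def bmA : List Char → Int → List Int → List Int → List Int → List Int → List Int →
    Bool × List Int × List Int × List Int × List Int
  | [], _, stk, L, R, mL, mR => (stk.isEmpty, L, R, mL, mR)
  | c :: cs, id, stk, L, R, mL, mR =>
    if c = '(' then
      bmA cs (id + 1) (id :: stk) L R (if stk.isEmpty then mL ++ [id] else mL) mR
    else if c = ')' then
      match stk with
      | [] => (false, [], [], [], [])
      | t :: stk' =>
        bmA cs (id + 1) stk' (L ++ [t]) (R ++ [id]) mL
          (if stk'.isEmpty then mR ++ [id] else mR)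
    else
      bmA cs (id + 1) stk L R mL mR

def bracket_match (ipt : String) : Bool × List Int × List Int × List Int × List Int :=
  bmA ipt.toList 0 [] [] [] [] []

-- ===== PORT B =====
-- Source B's 'group(i, open_pos, L, R)': index iteration becomes consuming the suffix list,
-- returning the suffix past the closing ')' together with its position; the length bound in
-- the subtype is only the termination certificate for the continue-after-nested-group call.
-- .error (L, R) = Python's (None, L, R) (group never closed).
def groupB (cs : List Char) (id op : Int) (L R : List Int) :
    Except (List Int × List Int)
      ({rest : List Char // rest.length < cs.length} × Int × List Int × List Int) :=
  match cs with
  | [] => .error (L, R)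
  | c :: cs' =>
    if c = '(' then
      match groupB cs' (id + 1) id L R with
      | .error e => .error e
      | .ok (⟨rest, h⟩, j, L', R') =>
        match groupB rest j op L' R' with
        | .error e => .error e
        | .ok (⟨rest2, h2⟩, j2, L2, R2) =>
          .ok (⟨rest2, by simp only [List.length_cons]; omega⟩, j2, L2, R2)
    else if c = ')' then
      .ok (⟨cs', by simp⟩, id + 1, L ++ [op], R ++ [id])
    else
      match groupB cs' (id + 1) op L R with
      | .error e => .error e
      | .ok (⟨rest, h⟩, j, L', R') =>
        .ok (⟨rest, by simp only [List.length_cons]; omega⟩, j, L', R')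
termination_by cs.length
decreasing_by
  · simp
  · simp only [List.length_cons]; omega
  · simp

-- Source B's top-level while loop.
def topB (cs : List Char) (id : Int) (L R mL mR : List Int) :
    Bool × List Int × List Int × List Int × List Int :=
  match cs with
  | [] => (true, L, R, mL, mR)
  | c :: cs' =>
    if c = '(' then
      match groupB cs' (id + 1) id L R with
      | .error (L', R') => (false, L', R', mL ++ [id], mR)
      | .ok (⟨rest, _h⟩, j, L', R') =>
        topB rest j L' R' (mL ++ [id]) (mR ++ [j - 1])
    else if c = ')' then (false, [], [], [], [])
    else topB cs' (id + 1) L R mL mR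
termination_by cs.length
decreasing_by
  · simp only [List.length_cons]; omega
  · simp

def bracket_match_alt (ipt : String) : Bool × List Int × List Int × List Int × List Int :=
  topB ipt.toList 0 [] [] [] []

-- ===== PRECONDITION & SPEC =====
def Spec_bracket_match (ipt : String) (out : Bool × List Int × List Int × List Int × List Int) : Prop := out = bracket_match_alt ipt
instance (ipt : String) (out : Bool × List Int × List Int × List Int × List Int) : Decidable (Spec_bracket_match ipt out) := by unfold Spec_bracket_match; infer_instance

-- ===== CLAIM (what is proved, stated in full; the proofs are below) =====
def Claim_equal_bracket_match : Prop := ∀ (ipt : String), Dom_bracket_match ipt → Spec_bracket_match ipt (bracket_match ipt)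

-- ===== LEMMAS AND PROOFS =====

-- While A runs inside a group (stack = op :: stk), its trace is exactly groupB's.
theorem bmA_group (n : Nat) : ∀ (cs : List Char), cs.length ≤ n →
    ∀ (id op : Int) (stk L R mL mR : List Int),
    bmA cs id (op :: stk) L R mL mR =
      (match groupB cs id op L R with
       | .error (L', R') => (false, L', R', mL, mR)
       | .ok (⟨rest, _⟩, j, L', R') =>
         bmA rest j stk L' R' mL (if stk.isEmpty then mR ++ [j - 1] else mR)) := by
  induction n with
  | zero =>
    intro cs hcs id op stk L R mL mR
    have : cs = [] := List.length_eq_zero_iff.mp (Nat.le_zero.mp hcs)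
    subst this
    simp [bmA, groupB]
  | succ n ih =>
    intro cs hcs id op stk L R mL mR
    match cs with
    | [] => simp [bmA, groupB]
    | c :: cs' =>
      by_cases hc1 : c = '('
      · rw [show bmA (c :: cs') id (op :: stk) L R mL mR =
            bmA cs' (id + 1) (id :: op :: stk) L R mL mR by simp [bmA, hc1]]
        have hlen : cs'.length ≤ n := by simp only [List.length_cons] at hcs; omega
        rw [ih cs' hlen (id + 1) id (op :: stk) L R mL mR]
        rw [show groupB (c :: cs') id op L R =
            (match groupB cs' (id + 1) id L R with
             | .error e => .error e
             | .ok (⟨rest, h⟩, j, L', R') =>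
               match groupB rest j op L' R' with
               | .error e => .error e
               | .ok (⟨rest2, h2⟩, j2, L2, R2) =>
                 .ok (⟨rest2, by simp only [List.length_cons]; omega⟩, j2, L2, R2))
            by rw [groupB]; simp [hc1]]
        cases hg : groupB cs' (id + 1) id L R with
        | error e => cases e; simp
        | ok v =>
          obtain ⟨⟨rest, hrest⟩, j, L', R'⟩ := v
          simp only [List.isEmpty_cons, Bool.false_eq_true, if_false]
          have : rest.length ≤ n := by omega
          rw [ih rest this j op stk L' R' mL mR]
          cases hg2 : groupB rest j op L' R' with
          | error e => cases e; simp
          | ok v2 => obtain ⟨⟨rest2, h2⟩, j2, L2, R2⟩ := v2; simp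
      · by_cases hc2 : c = ')'
        · rw [show bmA (c :: cs') id (op :: stk) L R mL mR =
              bmA cs' (id + 1) stk (L ++ [op]) (R ++ [id]) mL
                (if stk.isEmpty then mR ++ [id] else mR) by simp [bmA, hc2]]
          rw [show groupB (c :: cs') id op L R =
              .ok (⟨cs', by simp⟩, id + 1, L ++ [op], R ++ [id])
              by rw [groupB]; simp [hc2]]
          have h1 : (id + 1 - 1 : Int) = id := by omega
          simp only [h1]
        · rw [show bmA (c :: cs') id (op :: stk) L R mL mR =
              bmA cs' (id + 1) (op :: stk) L R mL mR by simp [bmA, hc1, hc2]]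
          have hlen : cs'.length ≤ n := by simp only [List.length_cons] at hcs; omega
          rw [ih cs' hlen (id + 1) op stk L R mL mR]
          rw [show groupB (c :: cs') id op L R =
              (match groupB cs' (id + 1) op L R with
               | .error e => .error e
               | .ok (⟨rest, h⟩, j, L', R') =>
                 .ok (⟨rest, by simp only [List.length_cons]; omega⟩, j, L', R'))
              by rw [groupB]; simp [hc1, hc2]]
          cases hg : groupB cs' (id + 1) op L R with
          | error e => cases e; simp
          | ok v => obtain ⟨⟨rest, hrest⟩, j, L', R'⟩ := v; simp

-- At stack depth 0 A's trace is topB's.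
theorem bmA_top (n : Nat) : ∀ (cs : List Char), cs.length ≤ n →
    ∀ (id : Int) (L R mL mR : List Int),
    bmA cs id [] L R mL mR = topB cs id L R mL mR := by
  induction n with
  | zero =>
    intro cs hcs id L R mL mR
    have : cs = [] := List.length_eq_zero_iff.mp (Nat.le_zero.mp hcs)
    subst this
    simp [bmA, topB]
  | succ n ih =>
    intro cs hcs id L R mL mR
    match cs with
    | [] => simp [bmA, topB]
    | c :: cs' =>
      have hlen : cs'.length ≤ n := by simp only [List.length_cons] at hcs; omega
      by_cases hc1 : c = '('
      · rw [show bmA (c :: cs') id [] L R mL mR =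
            bmA cs' (id + 1) [id] L R (mL ++ [id]) mR by simp [bmA, hc1]]
        rw [bmA_group cs'.length cs' (le_refl _) (id + 1) id [] L R (mL ++ [id]) mR]
        rw [show topB (c :: cs') id L R mL mR =
            (match groupB cs' (id + 1) id L R with
             | .error (L', R') => (false, L', R', mL ++ [id], mR)
             | .ok (⟨rest, h⟩, j, L', R') =>
               topB rest j L' R' (mL ++ [id]) (mR ++ [j - 1]))
            by rw [topB]; simp [hc1]]
        cases hg : groupB cs' (id + 1) id L R with
        | error e => cases e; simp
        | ok v =>
          obtain ⟨⟨rest, hrest⟩, j, L', R'⟩ := v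
          simp only [List.isEmpty_nil, if_true]
          exact ih rest (by omega) j L' R' (mL ++ [id]) (mR ++ [j - 1])
      · by_cases hc2 : c = ')'
        · rw [show bmA (c :: cs') id [] L R mL mR = (false, [], [], [], []) by
              simp [bmA, hc2]]
          rw [topB]; simp [hc2]
        · rw [show bmA (c :: cs') id [] L R mL mR =
              bmA cs' (id + 1) [] L R mL mR by simp [bmA, hc1, hc2]]
          rw [ih cs' hlen (id + 1) L R mL mR]
          rw [topB]; simp [hc1, hc2]

-- ===== VERDICT (by name: the statement is the Claim_ definition above) =====
theorem bracket_match_spec : Claim_equal_bracket_match := by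
  intro ipt _
  unfold Spec_bracket_match bracket_match bracket_match_alt
  exact bmA_top ipt.toList.length ipt.toList (le_refl _) 0 [] [] [] []
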